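-- pv_equiv track=rewrite | github.com/qinacme/qinacme-interview | 2018FT/amazon_oa.py | select_movie_eq_bf
-- ===== SOURCE A (Python) =====
-- def select_movie_eq_bf(m_lens, dur):
--     dur -= 30
--     n = len(m_lens)
--     long_m = 0
--     short_m = 0
--     res = []
--     for i in range(n-1):
--         for j in range(i+1, n):
--             t1, t2 = m_lens[i], m_lens[j]
--             if t1+t2 == dur and max(t1, t2) > long_m:
--                     long_m, short_m = max(t1, t2), min(t1, t2)
--                     res = [i, j]
--     return res
-- ===== SOURCE B (Python) =====
-- def select_movie_eq_bf(m_lens, dur):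
--     # Single O(n) pass: classic two-sum scan keeping, per value, its first index,
--     # and keeping the candidate pair with the largest (positive) longer movie.
--     target = dur - 30
--     first_idx = {}
--     long_m = 0
--     res = []
--     for j, v in enumerate(m_lens):
--         c = target - v
--         i = first_idx.get(c)
--         if i is not None and max(c, v) > long_m:
--             long_m = max(c, v)
--             res = [i, j]
--         if v not in first_idx:
--             first_idx[v] = j
--     return res
-- ===== Notes on version B (the rewrite author's own statement) =====
-- stated objective: faster
-- what changed: Replaced the O(n^2) nested scan over all index pairs by a single two-sum pass that keeps a hash map from value to its first index and updates the best (largest longer-movie) candidate pair on the fly.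
import Mathlib
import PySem

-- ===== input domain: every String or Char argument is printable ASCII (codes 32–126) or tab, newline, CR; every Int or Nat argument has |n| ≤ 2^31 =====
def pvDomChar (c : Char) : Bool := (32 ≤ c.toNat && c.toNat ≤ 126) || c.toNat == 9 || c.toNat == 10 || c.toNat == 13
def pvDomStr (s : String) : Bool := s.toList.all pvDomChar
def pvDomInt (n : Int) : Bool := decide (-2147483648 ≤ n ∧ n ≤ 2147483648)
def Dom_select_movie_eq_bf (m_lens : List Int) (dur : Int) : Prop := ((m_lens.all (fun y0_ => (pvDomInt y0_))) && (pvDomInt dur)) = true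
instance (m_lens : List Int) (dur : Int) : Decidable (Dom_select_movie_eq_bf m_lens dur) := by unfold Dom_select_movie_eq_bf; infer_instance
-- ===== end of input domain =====

-- B replaces A's O(n^2) scan over all index pairs by a single two-sum pass with a
-- value → first-index hash map (objective: faster).

-- ===== PORT A =====
def select_movie_eq_bf (m_lens : List Int) (dur : Int) : List Int :=
  let dur2 := dur - 30
  let n : Int := m_lens.length
  let st := (PySem.List.pyRange 0 (n - 1) 1).foldl (fun st i =>
    (PySem.List.pyRange (i + 1) n 1).foldl (fun st j =>
      let t1 := PySem.List.pyGetD m_lens i 0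
      let t2 := PySem.List.pyGetD m_lens j 0
      if t1 + t2 = dur2 ∧ max t1 t2 > st.1 then (max t1 t2, min t1 t2, [i, j]) else st) st)
    ((0:Int), (0:Int), ([] : List Int))
  st.2.2

-- ===== PORT B =====
def select_movie_eq_bf_alt (m_lens : List Int) (dur : Int) : List Int :=
  let target := dur - 30
  let st := (PySem.List.enumerate m_lens 0).foldl (fun st p =>
    let j := p.1
    let v := p.2
    let c := target - v
    let st' := match st.1.get? c with
      | some i => if max c v > st.2.1 then (st.1, max c v, [i, j]) else st
      | none => st
    if st'.1.contains v then st' else (st'.1.insert v j, st'.2))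
    ((PySem.Dict.empty : PySem.Dict Int Int), (0:Int), ([] : List Int))
  st.2.2

-- ===== PRECONDITION & SPEC =====
def Spec_select_movie_eq_bf (m_lens : List Int) (dur : Int) (out : List Int) : Prop := out = select_movie_eq_bf_alt m_lens dur
instance (m_lens : List Int) (dur : Int) (out : List Int) : Decidable (Spec_select_movie_eq_bf m_lens dur out) := by unfold Spec_select_movie_eq_bf; infer_instance

-- ===== CLAIM (what is proved, stated in full; the proofs are below) =====
def Claim_equal_select_movie_eq_bf : Prop := ∀ (m_lens : List Int) (dur : Int), Dom_select_movie_eq_bf m_lens dur → Spec_select_movie_eq_bf m_lens dur (select_movie_eq_bf m_lens dur)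

-- ===== LEMMAS AND PROOFS =====

-- Abstract "keep the strictly larger candidate" selection step shared by both analyses.
def pvSel {α : Type} (st e : Int × α) : Int × α := if st.1 < e.1 then e else st

def pvOut : Option (Nat × Nat) → List Int
  | none => []
  | some p => [(p.1 : Int), (p.2 : Int)]

def pvG (m : List Int) (k : Nat) : Int := m.getD k 0

def pvValid (m : List Int) (T : Int) (i j : Nat) : Prop :=
  i < j ∧ j < m.length ∧ pvG m i + pvG m j = T

-- all index pairs i < j < n in row-major order
def pvPairs (n : Nat) : List (Nat × Nat) :=
  (List.range n).flatMap (fun i => (List.range' (i+1) (n-(i+1))).map (fun j => (i, j)))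

-- A's candidate events (valid pairs with their longer length), row-major order
def pvEvA (m : List Int) (T : Int) : List (Int × Option (Nat × Nat)) :=
  (pvPairs m.length).filterMap (fun p =>
    if pvG m p.1 + pvG m p.2 = T then some (max (pvG m p.1) (pvG m p.2), some p) else none)

-- B's candidate events (first-complement-index pairs), in order of the second index
def pvF (m : List Int) (T : Int) (j : Nat) : Option (Int × Option (Nat × Nat)) :=
  match List.idxOf? (T - pvG m j) (m.take j) with
  | some i => some (max (T - pvG m j) (pvG m j), some (i, j))
  | none => none

def pvEvB (m : List Int) (T : Int) : List (Int × Option (Nat × Nat)) :=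
  (List.range m.length).filterMap (pvF m T)

-- B's loop body, named for the proofs (definitionally the fold body of the port)
def pvBstep (T : Int) (st : PySem.Dict Int Int × Int × List Int) (p : Int × Int) :
    PySem.Dict Int Int × Int × List Int :=
  let j := p.1
  let v := p.2
  let c := T - v
  let st' := match st.1.get? c with
    | some i => if max c v > st.2.1 then (st.1, max c v, [i, j]) else st
    | none => st
  if st'.1.contains v then st' else (st'.1.insert v j, st'.2)

-- generic fold lemmas -------------------------------------------------------

theorem pvFoldl_rel {σ τ γ : Type} (R : σ → τ → Prop) (f : σ → γ → σ) (g : τ → γ → τ)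
    (h : ∀ s t x, R s t → R (f s x) (g t x)) :
    ∀ (l : List γ) (s : σ) (t : τ), R s t → R (l.foldl f s) (l.foldl g t) := by
  intro l
  induction l with
  | nil => intro s t h0; exact h0
  | cons x l ih => intro s t h0; exact ih _ _ (h _ _ _ h0)

theorem pvSel_fst {α : Type} (L : List (Int × α)) (g0 : Int) (r0 : α) :
    (L.foldl pvSel (g0, r0)).1 = (L.map (·.1)).foldl max g0 := by
  induction L generalizing g0 r0 with
  | nil => rfl
  | cons e L ih =>
    simp only [List.foldl_cons, List.map_cons]
    by_cases h : g0 < e.1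
    · have hsel : pvSel (g0, r0) e = (e.1, e.2) := by simp [pvSel, h]
      rw [hsel, ih, max_eq_right (le_of_lt h)]
    · have hsel : pvSel (g0, r0) e = (g0, r0) := by simp [pvSel, h]
      rw [hsel, ih, max_eq_left (not_lt.mp h)]

theorem pvFoldlMax_attained (L : List Int) (a : Int) : L.foldl max a = a ∨ L.foldl max a ∈ L := by
  induction L generalizing a with
  | nil => left; rfl
  | cons x L ih =>
    simp only [List.foldl_cons]
    rcases ih (max a x) with h | h
    · rw [h]
      rcases max_choice a x with h2 | h2 <;> rw [h2]
      · left; rfl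
      · right; exact List.mem_cons_self
    · right; exact List.mem_cons_of_mem _ h

theorem pvFoldlMax_le (L : List Int) (a c : Int) (ha : a ≤ c) (h : ∀ x ∈ L, x ≤ c) :
    L.foldl max a ≤ c := by
  induction L generalizing a with
  | nil => exact ha
  | cons x L ih =>
    simp only [List.foldl_cons]
    exact ih _ (max_le ha (h x List.mem_cons_self)) (fun y hy => h y (List.mem_cons_of_mem _ hy))

theorem pvSel_snd {α : Type} (L : List (Int × α)) (g0 : Int) (r0 : α) (M : Int)
    (hM : (L.map (·.1)).foldl max g0 = M) :
    (L.foldl pvSel (g0, r0)).2 =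
      if g0 = M then r0 else ((L.find? (fun e => decide (M ≤ e.1))).map (·.2)).getD r0 := by
  induction L generalizing g0 r0 with
  | nil =>
    simp only [List.map_nil, List.foldl_nil] at hM
    simp [hM]
  | cons e L ih =>
    have hg0M : g0 ≤ M := by
      have h1 := (PySem.List.le_foldl_max (((e :: L).map (·.1))) g0).1
      rw [hM] at h1; exact h1
    have heM : e.1 ≤ M := by
      have h1 := (PySem.List.le_foldl_max (((e :: L).map (·.1))) g0).2 e.1 (by simp)
      rw [hM] at h1; exact h1
    simp only [List.map_cons, List.foldl_cons] at hM ⊢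
    by_cases h : g0 < e.1
    · have hsel : pvSel (g0, r0) e = (e.1, e.2) := by simp [pvSel, h]
      have hM' : (L.map (·.1)).foldl max e.1 = M := by
        rw [← hM]; congr 1; exact (max_eq_right (le_of_lt h)).symm
      rw [hsel, ih e.1 e.2 hM']
      have hg0ne : ¬ g0 = M := by omega
      rw [if_neg hg0ne]
      by_cases he : e.1 = M
      · rw [if_pos he, List.find?_cons_of_pos (by simp [he])]
        simp
      · have hlt : e.1 < M := lt_of_le_of_ne heM he
        rw [if_neg he, List.find?_cons_of_neg (by simp; omega)]
        rcases pvFoldlMax_attained (L.map (·.1)) e.1 with hc | hc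
        · rw [hM'] at hc; omega
        · rw [hM'] at hc
          obtain ⟨x, hx, hx1⟩ := List.mem_map.mp hc
          have hs : (L.find? (fun e => decide (M ≤ e.1))).isSome :=
            List.find?_isSome.mpr ⟨x, hx, by simp [hx1]⟩
          obtain ⟨y, hy⟩ := Option.isSome_iff_exists.mp hs
          rw [hy]; simp
    · have hsel : pvSel (g0, r0) e = (g0, r0) := by simp [pvSel, h]
      have hM' : (L.map (·.1)).foldl max g0 = M := by
        rw [← hM]; congr 1; exact (max_eq_left (not_lt.mp h)).symm
      rw [hsel, ih g0 r0 hM']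
      by_cases hg : g0 = M
      · simp [hg]
      · have he1 : e.1 ≤ g0 := not_lt.mp h
        rw [if_neg hg, if_neg hg, List.find?_cons_of_neg (by simp; omega)]

theorem pvFind?_min {α : Type} {R : α → α → Prop} {p : α → Bool} {l : List α} {a : α}
    (hp : l.Pairwise R) (ha : l.find? p = some a) : ∀ b ∈ l, p b → b = a ∨ R a b := by
  induction l with
  | nil => intro b hb; simp at hb
  | cons x l ih =>
    intro b hb hpb
    rcases List.pairwise_cons.mp hp with ⟨hx, hl⟩
    by_cases hpx : p x
    · rw [List.find?_cons_of_pos hpx] at ha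
      injection ha with ha; subst ha
      rcases List.mem_cons.mp hb with rfl | hb
      · left; rfl
      · right; exact hx b hb
    · rw [List.find?_cons_of_neg hpx] at ha
      rcases List.mem_cons.mp hb with rfl | hb
      · exact absurd hpb (by simpa using hpx)
      · exact ih hl ha b hb hpb

-- pyRange → Nat ranges ------------------------------------------------------

theorem pvPyRangeNat (a b : Int) (ha : 0 ≤ a) :
    PySem.List.pyRange a b 1 = List.map (fun k : Nat => (k : Int)) (List.range' a.toNat (b.toNat - a.toNat)) := by
  have h1 : (b - a).toNat = b.toNat - a.toNat := by omega
  rw [PySem.List.pyRange_one, h1]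
  apply List.ext_getElem
  · simp
  · intro i h1' h2'
    simp only [List.getElem_map, List.getElem_range, List.getElem_range']
    omega

-- membership characterizations ---------------------------------------------

theorem pvMem_pvPairs (n : Nat) (p : Nat × Nat) : p ∈ pvPairs n ↔ p.1 < p.2 ∧ p.2 < n := by
  unfold pvPairs
  simp only [List.mem_flatMap, List.mem_map, List.mem_range, List.mem_range'_1]
  constructor
  · rintro ⟨i, hi, j, hj, rfl⟩
    exact ⟨by omega, by omega⟩
  · rintro ⟨h1, h2⟩
    exact ⟨p.1, by omega, p.2, ⟨by omega, by omega⟩, by simp⟩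

theorem pvG_eq {m : List Int} {i : Nat} (h : i < m.length) : pvG m i = m[i] := by
  simp [pvG, List.getD_eq_getElem?_getD, List.getElem?_eq_getElem h]

theorem pvMem_pvEvA (m : List Int) (T : Int) (e : Int × Option (Nat × Nat)) :
    e ∈ pvEvA m T ↔ ∃ i j, pvValid m T i j ∧ e = (max (pvG m i) (pvG m j), some (i, j)) := by
  constructor
  · intro h
    simp only [pvEvA, List.mem_filterMap] at h
    obtain ⟨p, hp, hf⟩ := h
    rw [pvMem_pvPairs] at hp
    by_cases hc : pvG m p.1 + pvG m p.2 = T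
    · rw [if_pos hc] at hf
      injection hf with hf
      exact ⟨p.1, p.2, ⟨hp.1, hp.2, hc⟩, hf.symm⟩
    · rw [if_neg hc] at hf; cases hf
  · rintro ⟨i, j, ⟨h1, h2, h3⟩, rfl⟩
    simp only [pvEvA, List.mem_filterMap]
    refine ⟨(i, j), (pvMem_pvPairs _ _).mpr ⟨h1, h2⟩, ?_⟩
    simp [h3]

theorem pvMem_pvEvB (m : List Int) (T : Int) (e : Int × Option (Nat × Nat)) :
    e ∈ pvEvB m T ↔ ∃ j, j < m.length ∧ ∃ i, List.idxOf? (T - pvG m j) (m.take j) = some i ∧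
      e = (max (T - pvG m j) (pvG m j), some (i, j)) := by
  constructor
  · intro h
    simp only [pvEvB, List.mem_filterMap, List.mem_range] at h
    obtain ⟨j, hj, hf⟩ := h
    unfold pvF at hf
    rcases heq : List.idxOf? (T - pvG m j) (m.take j) with _ | i
    · rw [heq] at hf; simp at hf
    · rw [heq] at hf
      injection hf with hf
      exact ⟨j, hj, i, heq, hf.symm⟩
  · rintro ⟨j, hj, i, heq, rfl⟩
    simp only [pvEvB, List.mem_filterMap, List.mem_range]
    exact ⟨j, hj, by unfold pvF; rw [heq]⟩

theorem pvIdx_facts {m : List Int} {c : Int} {i j : Nat}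
    (h : List.idxOf? c (m.take j) = some i) (hj : j ≤ m.length) :
    i < j ∧ pvG m i = c ∧ ∀ k, k < i → pvG m k ≠ c := by
  obtain ⟨hlen, hval, hmin⟩ := List.idxOf?_eq_some_iff.mp h
  have hij : i < j := by rw [List.length_take] at hlen; omega
  have him : i < m.length := by rw [List.length_take] at hlen; omega
  rw [List.getElem_take] at hval
  refine ⟨hij, ?_, ?_⟩
  · rw [pvG_eq him]; exact hval
  · intro k hk
    have hk2 : k < (m.take j).length := by rw [List.length_take]; rw [List.length_take] at hlen; omega
    have hne := hmin k hk
    rw [List.getElem_take] at hne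
    rw [pvG_eq (by omega : k < m.length)]
    exact hne

theorem pvIdx_exists {m : List Int} {c : Int} {i j : Nat}
    (hi : i < j) (hj : j ≤ m.length) (hc : pvG m i = c) :
    ∃ i', List.idxOf? c (m.take j) = some i' ∧ i' ≤ i ∧ pvG m i' = c := by
  have him : i < m.length := lt_of_lt_of_le hi hj
  have hi' : i < (m.take j).length := by rw [List.length_take]; omega
  have hti : (m.take j)[i] = c := by rw [List.getElem_take, ← pvG_eq him]; exact hc
  have hmem : c ∈ m.take j := hti ▸ List.getElem_mem hi'
  rcases heq : List.idxOf? c (m.take j) with _ | i'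
  · exact absurd hmem (List.idxOf?_eq_none_iff.mp heq)
  · obtain ⟨hlen, hval, hmin⟩ := List.idxOf?_eq_some_iff.mp heq
    refine ⟨i', rfl, ?_, ?_⟩
    · by_contra hgt
      exact hmin i (Nat.lt_of_not_le hgt) hti
    · have hi'm : i' < m.length := by rw [List.length_take] at hlen; omega
      rw [List.getElem_take] at hval
      rw [pvG_eq hi'm]; exact hval

-- orderings -----------------------------------------------------------------

theorem pvPairs_pairwise (n : Nat) :
    (pvPairs n).Pairwise (fun p q => p.1 < q.1 ∨ (p.1 = q.1 ∧ p.2 < q.2)) := by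
  unfold pvPairs
  rw [List.pairwise_flatMap]
  constructor
  · intro i _
    rw [List.pairwise_map]
    exact (List.pairwise_lt_range' (s := i+1) (n := n - (i+1)) 1).imp
      (fun h => Or.inr ⟨rfl, h⟩)
  · refine List.pairwise_lt_range.imp ?_
    intro i i' hii x hx y hy
    obtain ⟨j, _, rfl⟩ := List.mem_map.mp hx
    obtain ⟨j', _, rfl⟩ := List.mem_map.mp hy
    left; simpa using hii

theorem pvEvA_pairwise (m : List Int) (T : Int) :
    (pvEvA m T).Pairwise (fun e e' => ∀ p q, e.2 = some p → e'.2 = some q →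
      p.1 < q.1 ∨ (p.1 = q.1 ∧ p.2 < q.2)) := by
  refine List.Pairwise.filterMap _ ?_ (pvPairs_pairwise m.length)
  intro a a' haa b hb b' hb'
  split_ifs at hb hb' with h1 h2
  · injection hb with hb
    injection hb' with hb'
    subst hb hb'
    intro p q hp hq
    simp only [Option.some.injEq] at hp hq
    subst hp hq
    exact haa

theorem pvEvB_pairwise (m : List Int) (T : Int) :
    (pvEvB m T).Pairwise (fun e e' => ∀ p q, e.2 = some p → e'.2 = some q → p.2 < q.2) := by
  refine List.Pairwise.filterMap _ ?_ (List.pairwise_lt_range (n := m.length))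
  intro j j' hjj b hb b' hb'
  unfold pvF at hb hb'
  rcases h1 : List.idxOf? (T - pvG m j) (m.take j) with _ | i
  · rw [h1] at hb; simp at hb
  · rw [h1] at hb
    rcases h2 : List.idxOf? (T - pvG m j') (m.take j') with _ | i'
    · rw [h2] at hb'; simp at hb'
    · rw [h2] at hb'
      injection hb with hb
      injection hb' with hb'
      subst hb hb'
      intro p q hp hq
      simp only [Option.some.injEq] at hp hq
      subst hp hq
      simpa using hjj

-- bridges -------------------------------------------------------------------

theorem pvRangeExt {σ : Type} (n : Nat) (F : σ → Nat → σ) (hF : ∀ s i, n ≤ i + 1 → F s i = s)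
    (init : σ) : (List.range' 0 (n - 1)).foldl F init = (List.range n).foldl F init := by
  cases n with
  | zero => rfl
  | succ k =>
    rw [List.range_eq_range', show (k + 1 : Nat) - 1 = k from rfl,
      show List.range' 0 (k + 1) = List.range' 0 k ++ [k] by
        rw [List.range'_concat]; simp,
      List.foldl_append]
    simp only [List.foldl_cons, List.foldl_nil]
    rw [hF _ k le_rfl]

theorem pvFoldl_ext {σ γ : Type} (f g : σ → γ → σ) (h : ∀ s x, f s x = g s x) :
    ∀ (l : List γ) (s : σ), l.foldl f s = l.foldl g s := by
  intro l
  induction l with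
  | nil => intro s; rfl
  | cons x l ih => intro s; rw [List.foldl_cons, List.foldl_cons, h]; exact ih _

-- A's concrete loop body and its abstract counterpart, on an index pair
def pvConA (m : List Int) (T : Int) (st : Int × Int × List Int) (p : Nat × Nat) :
    Int × Int × List Int :=
  if pvG m p.1 + pvG m p.2 = T ∧ max (pvG m p.1) (pvG m p.2) > st.1
  then (max (pvG m p.1) (pvG m p.2), min (pvG m p.1) (pvG m p.2), [(p.1 : Int), (p.2 : Int)])
  else st

def pvAbsA (m : List Int) (T : Int) (st : Int × Option (Nat × Nat)) (p : Nat × Nat) :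
    Int × Option (Nat × Nat) :=
  if pvG m p.1 + pvG m p.2 = T then pvSel st (max (pvG m p.1) (pvG m p.2), some p) else st

theorem pvStepRel (m : List Int) (T : Int) (s : Int × Int × List Int)
    (t : Int × Option (Nat × Nat)) (p : Nat × Nat) (h : s.1 = t.1 ∧ s.2.2 = pvOut t.2) :
    (pvConA m T s p).1 = (pvAbsA m T t p).1 ∧ (pvConA m T s p).2.2 = pvOut (pvAbsA m T t p).2 := by
  obtain ⟨h1, h2⟩ := h
  unfold pvConA pvAbsA pvSel
  by_cases hc : pvG m p.1 + pvG m p.2 = T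
  · by_cases hlt : t.1 < max (pvG m p.1) (pvG m p.2)
    · rw [if_pos ⟨hc, by rw [h1]; exact hlt⟩, if_pos hc, if_pos hlt]
      exact ⟨rfl, rfl⟩
    · rw [if_neg (by rw [h1]; exact fun hh => hlt hh.2), if_pos hc, if_neg hlt]
      exact ⟨h1, h2⟩
  · rw [if_neg (fun hh => hc hh.1), if_neg hc]
    exact ⟨h1, h2⟩

theorem pvBridgeA (m : List Int) (dur : Int) :
    select_movie_eq_bf m dur =
      pvOut ((pvEvA m (dur - 30)).foldl pvSel ((0:Int), (none : Option (Nat × Nat)))).2 := by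
  -- the abstract event fold as a nested fold over Nat index ranges
  have habs : (pvEvA m (dur - 30)).foldl pvSel ((0:Int), (none : Option (Nat × Nat)))
      = (List.range m.length).foldl (fun st i =>
          (List.range' (i+1) (m.length - (i+1))).foldl
            (fun st j => pvAbsA m (dur - 30) st (i, j)) st)
          ((0:Int), (none : Option (Nat × Nat))) := by
    simp only [pvEvA, pvPairs]
    rw [List.foldl_filterMap, List.foldl_flatMap]
    refine pvFoldl_ext _ _ ?_ _ _
    intro st i
    rw [List.foldl_map]
    refine pvFoldl_ext _ _ ?_ _ _
    intro st' j
    by_cases hc : pvG m i + pvG m j = dur - 30 <;> simp [pvAbsA, hc]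
  -- the port as the same nested fold with A's concrete state
  have hcon : select_movie_eq_bf m dur
      = ((List.range m.length).foldl (fun st i =>
          (List.range' (i+1) (m.length - (i+1))).foldl
            (fun st j => pvConA m (dur - 30) st (i, j)) st)
          ((0:Int), (0:Int), ([] : List Int))).2.2 := by
    show ((PySem.List.pyRange 0 ((m.length : Int) - 1) 1).foldl (fun st i =>
      (PySem.List.pyRange (i + 1) (m.length : Int) 1).foldl (fun st j =>
        if PySem.List.pyGetD m i 0 + PySem.List.pyGetD m j 0 = dur - 30 ∧
            max (PySem.List.pyGetD m i 0) (PySem.List.pyGetD m j 0) > st.1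
        then (max (PySem.List.pyGetD m i 0) (PySem.List.pyGetD m j 0),
              min (PySem.List.pyGetD m i 0) (PySem.List.pyGetD m j 0), [i, j]) else st) st)
      ((0:Int), (0:Int), ([] : List Int))).2.2 = _
    have hOut : PySem.List.pyRange 0 ((m.length : Int) - 1) 1
        = List.map (fun k : Nat => (k : Int)) (List.range' 0 (m.length - 1)) := by
      rw [pvPyRangeNat 0 _ le_rfl]
      congr 2
      omega
    rw [hOut, List.foldl_map]
    have h1 : (List.range' 0 (m.length - 1)).foldl (fun (st : Int × Int × List Int) (i : Nat) =>
        (PySem.List.pyRange ((i : Int) + 1) (m.length : Int) 1).foldl (fun st j =>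
          if PySem.List.pyGetD m (i : Int) 0 + PySem.List.pyGetD m j 0 = dur - 30 ∧
              max (PySem.List.pyGetD m (i : Int) 0) (PySem.List.pyGetD m j 0) > st.1
          then (max (PySem.List.pyGetD m (i : Int) 0) (PySem.List.pyGetD m j 0),
                min (PySem.List.pyGetD m (i : Int) 0) (PySem.List.pyGetD m j 0),
                [(i : Int), j]) else st) st) ((0:Int), (0:Int), ([] : List Int))
        = (List.range' 0 (m.length - 1)).foldl (fun st i =>
            (List.range' (i+1) (m.length - (i+1))).foldl
              (fun st j => pvConA m (dur - 30) st (i, j)) st)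
            ((0:Int), (0:Int), ([] : List Int)) := by
      refine pvFoldl_ext _ _ ?_ _ _
      intro st i
      have hIn : PySem.List.pyRange ((i : Int) + 1) (m.length : Int) 1
          = List.map (fun k : Nat => (k : Int)) (List.range' (i+1) (m.length - (i+1))) := by
        rw [pvPyRangeNat _ _ (by omega)]
        congr 2
      rw [hIn, List.foldl_map]
      refine pvFoldl_ext _ _ ?_ _ _
      intro st' j
      simp only [PySem.List.pyGetD_natCast]
      rfl
    rw [h1]
    rw [pvRangeExt m.length _ (fun s i hi => by
      have h0 : m.length - (i+1) = 0 := by omega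
      rw [h0]
      rfl)]
  rw [hcon, habs]
  exact (pvFoldl_rel
    (fun (st : Int × Int × List Int) (ast : Int × Option (Nat × Nat)) =>
      st.1 = ast.1 ∧ st.2.2 = pvOut ast.2)
    (fun st i => (List.range' (i+1) (m.length - (i+1))).foldl
      (fun st j => pvConA m (dur - 30) st (i, j)) st)
    (fun st i => (List.range' (i+1) (m.length - (i+1))).foldl
      (fun st j => pvAbsA m (dur - 30) st (i, j)) st)
    (fun s t i hst => pvFoldl_rel _
      (fun st j => pvConA m (dur - 30) st (i, j))
      (fun st j => pvAbsA m (dur - 30) st (i, j))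
      (fun s' t' j h' => pvStepRel m (dur - 30) s' t' (i, j) h')
      (List.range' (i+1) (m.length - (i+1))) s t hst)
    (List.range m.length) ((0:Int), (0:Int), ([] : List Int))
    ((0:Int), (none : Option (Nat × Nat))) ⟨rfl, rfl⟩).2

theorem pvIdxOf?_append_singleton (pref : List Int) (v c : Int) :
    List.idxOf? c (pref ++ [v]) =
      (List.idxOf? c pref).or (if v = c then some pref.length else none) := by
  induction pref with
  | nil =>
    by_cases h : v = c <;> simp [List.idxOf?_cons, h]
  | cons a pref ih =>
    by_cases h : a = c
    · simp [List.idxOf?_cons, h]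
    · simp only [List.cons_append, List.idxOf?_cons, beq_iff_eq, if_neg h, ih, List.length_cons]
      rcases hq : List.idxOf? c pref with _ | k
      · by_cases hv : v = c <;> simp [hv]
      · simp

theorem pvBinv (T : Int) :
    ∀ (suf pref : List Int) (D : PySem.Dict Int Int) (a : Int) (r : Option (Nat × Nat)),
      (∀ c : Int, D.get? c = Option.map (fun k : Nat => (k : Int)) (List.idxOf? c pref)) →
      ((PySem.List.enumerate suf (pref.length : Int)).foldl (pvBstep T) (D, a, pvOut r)).2 =
        (fun q => (q.1, pvOut q.2))
          (((List.range' pref.length suf.length).filterMap (pvF (pref ++ suf) T)).foldl pvSel (a, r)) := by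
  intro suf
  induction suf with
  | nil =>
    intro pref D a r hD
    rfl
  | cons v suf ih =>
    intro pref D a r hD
    rw [PySem.List.enumerate_cons, List.foldl_cons,
      show (v :: suf).length = suf.length + 1 from rfl, List.range'_succ, List.filterMap_cons]
    have htake : (pref ++ v :: suf).take pref.length = pref := List.take_left
    have hval : pvG (pref ++ v :: suf) pref.length = v := by
      simp [pvG, List.getD_eq_getElem?_getD]
    have happ : (pref ++ [v]) ++ suf = pref ++ v :: suf := by simp
    have hlen1 : ((pref ++ [v]).length : Int) = (pref.length : Int) + 1 := by simp
    have hlen1' : (pref ++ [v]).length = pref.length + 1 := by simp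
    have hF : pvF (pref ++ v :: suf) T pref.length
        = (match List.idxOf? (T - v) pref with
           | some i => some (max (T - v) v, some (i, pref.length))
           | none => none) := by
      unfold pvF
      rw [htake, hval]
    have hD' : ∀ c : Int,
        (if D.contains v then D else D.insert v (pref.length : Int)).get? c
          = Option.map (fun k : Nat => (k : Int)) (List.idxOf? c (pref ++ [v])) := by
      intro c
      rw [pvIdxOf?_append_singleton]
      by_cases hv : D.contains v
      · rw [if_pos hv]
        have hvs : v ∈ pref := by
          rw [PySem.Dict.contains_eq_isSome_get?, hD v] at hv
          simpa using hv
        by_cases hvc : v = c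
        · subst hvc
          rcases hk : List.idxOf? v pref with _ | k
          · exact absurd hvs (List.idxOf?_eq_none_iff.mp hk)
          · rw [hD, hk]; simp
        · rw [hD]
          rcases hq : List.idxOf? c pref with _ | k
          · simp [hvc]
          · simp
      · rw [if_neg hv]
        have hvn : List.idxOf? v pref = none := by
          rw [PySem.Dict.contains_eq_isSome_get?, hD v] at hv
          exact List.idxOf?_eq_none_iff.mpr (by simpa using hv)
        rw [PySem.Dict.get?_insert]
        by_cases hvc : c = v
        · subst hvc
          rw [if_pos rfl, hvn]
          simp
        · rw [if_neg hvc, hD]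
          rw [if_neg (fun hh => hvc hh.symm)]
          simp
    rcases hidx : List.idxOf? (T - v) pref with _ | i
    · -- no candidate at this position
      rw [hF, hidx]
      have hstep : pvBstep T (D, a, pvOut r) ((pref.length : Int), v)
          = (if D.contains v then D else D.insert v (pref.length : Int), a, pvOut r) := by
        unfold pvBstep
        simp only [hD, hidx, Option.map_none]
        by_cases hv : D.contains v <;> simp [hv]
      rw [hstep,
        show (pref.length : Int) + 1 = (((pref ++ [v]).length : Nat) : Int) by rw [hlen1],
        ih (pref ++ [v]) _ a r hD', happ, hlen1']
    · -- candidate (i, pref.length) at this position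
      rw [hF, hidx]
      have hsel : pvSel (a, r) (max (T - v) v, some (i, pref.length))
          = if a < max (T - v) v then ((max (T - v) v), some (i, pref.length)) else (a, r) := rfl
      by_cases hlt : a < max (T - v) v
      · have hstep : pvBstep T (D, a, pvOut r) ((pref.length : Int), v)
            = (if D.contains v then D else D.insert v (pref.length : Int),
               max (T - v) v, pvOut (some (i, pref.length))) := by
          unfold pvBstep
          simp only [hD, hidx, Option.map_some]
          rw [if_pos (show max (T - v) v > a from hlt)]
          by_cases hv : D.contains v <;> simp [hv, pvOut]
        rw [hstep,
          show (pref.length : Int) + 1 = (((pref ++ [v]).length : Nat) : Int) by rw [hlen1],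
          ih (pref ++ [v]) _ (max (T - v) v) (some (i, pref.length)) hD', happ, hlen1']
        simp only [List.foldl_cons]
        rw [hsel, if_pos hlt]
      · have hstep : pvBstep T (D, a, pvOut r) ((pref.length : Int), v)
            = (if D.contains v then D else D.insert v (pref.length : Int), a, pvOut r) := by
          unfold pvBstep
          simp only [hD, hidx, Option.map_some]
          rw [if_neg (show ¬ max (T - v) v > a from hlt)]
          by_cases hv : D.contains v <;> simp [hv]
        rw [hstep,
          show (pref.length : Int) + 1 = (((pref ++ [v]).length : Nat) : Int) by rw [hlen1],
          ih (pref ++ [v]) _ a r hD', happ, hlen1']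
        simp only [List.foldl_cons]
        rw [hsel, if_neg hlt]

theorem pvBridgeB (m : List Int) (dur : Int) :
    select_movie_eq_bf_alt m dur =
      pvOut ((pvEvB m (dur - 30)).foldl pvSel ((0:Int), (none : Option (Nat × Nat)))).2 := by
  have h0 : select_movie_eq_bf_alt m dur
      = ((PySem.List.enumerate m ((([] : List Int).length : Nat) : Int)).foldl (pvBstep (dur - 30))
          ((PySem.Dict.empty : PySem.Dict Int Int), (0:Int), pvOut none)).2.2 := rfl
  have h1 := congrArg Prod.snd (pvBinv (dur - 30) m [] PySem.Dict.empty 0 none (fun c => by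
    simp [List.idxOf?_nil, PySem.Dict.get?_empty]))
  rw [h0, h1]
  simp [pvEvB, List.range_eq_range']

-- the core: both event folds select the same pair ---------------------------

theorem pvCore (m : List Int) (T : Int) :
    (pvEvA m T).foldl pvSel ((0:Int), (none : Option (Nat × Nat))) =
      (pvEvB m T).foldl pvSel ((0:Int), (none : Option (Nat × Nat))) := by
  -- every candidate value of one side occurs on the other side
  have hAB : ∀ e ∈ pvEvA m T, ∃ e' ∈ pvEvB m T, e'.1 = e.1 := by
    intro e he
    obtain ⟨i, j, ⟨hij, hjn, hsum⟩, rfl⟩ := (pvMem_pvEvA m T e).mp he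
    obtain ⟨i', hidx, hle, hgi'⟩ := pvIdx_exists hij (le_of_lt hjn)
      (show pvG m i = T - pvG m j by omega)
    refine ⟨(max (T - pvG m j) (pvG m j), some (i', j)),
      (pvMem_pvEvB m T _).mpr ⟨j, hjn, i', hidx, rfl⟩, ?_⟩
    rw [show T - pvG m j = pvG m i by omega]
  have hBA : ∀ e ∈ pvEvB m T, ∃ e' ∈ pvEvA m T, e'.1 = e.1 := by
    intro e he
    obtain ⟨j, hjn, i, hidx, rfl⟩ := (pvMem_pvEvB m T e).mp he
    obtain ⟨hij, hgi, -⟩ := pvIdx_facts hidx (le_of_lt hjn)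
    refine ⟨(max (pvG m i) (pvG m j), some (i, j)),
      (pvMem_pvEvA m T _).mpr ⟨i, j, ⟨hij, hjn, by omega⟩, rfl⟩, ?_⟩
    rw [hgi]
  set MA := ((pvEvA m T).map (·.1)).foldl max (0:Int) with hMA
  set MB := ((pvEvB m T).map (·.1)).foldl max (0:Int) with hMB
  have hM : MA = MB := by
    apply le_antisymm
    · refine pvFoldlMax_le _ _ _ ?_ ?_
      · rw [hMB]; exact (PySem.List.le_foldl_max _ 0).1
      · intro x hx
        obtain ⟨e, he, rfl⟩ := List.mem_map.mp hx
        obtain ⟨e', he', h1⟩ := hAB e he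
        rw [← h1, hMB]
        exact (PySem.List.le_foldl_max _ 0).2 _ (List.mem_map_of_mem he')
    · refine pvFoldlMax_le _ _ _ ?_ ?_
      · rw [hMA]; exact (PySem.List.le_foldl_max _ 0).1
      · intro x hx
        obtain ⟨e, he, rfl⟩ := List.mem_map.mp hx
        obtain ⟨e', he', h1⟩ := hBA e he
        rw [← h1, hMA]
        exact (PySem.List.le_foldl_max _ 0).2 _ (List.mem_map_of_mem he')
  apply Prod.ext
  · rw [pvSel_fst, pvSel_fst, ← hMA, ← hMB, hM]
  · rw [pvSel_snd _ _ _ MA hMA.symm, pvSel_snd _ _ _ MB hMB.symm]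
    by_cases h0 : (0:Int) = MA
    · rw [if_pos h0, if_pos (hM ▸ h0)]
    · have h0B : ¬ (0:Int) = MB := fun h => h0 (by rw [hM, ← h])
      rw [if_neg h0, if_neg h0B]
      have h0le : (0:Int) ≤ MA := by rw [hMA]; exact (PySem.List.le_foldl_max _ 0).1
      have hMpos : 0 < MA := lt_of_le_of_ne h0le h0
      -- both find?s succeed
      have hfa : ∃ eA, (pvEvA m T).find? (fun e => decide (MA ≤ e.1)) = some eA := by
        rcases pvFoldlMax_attained ((pvEvA m T).map (·.1)) 0 with hc | hc
        · rw [← hMA] at hc; omega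
        · rw [← hMA] at hc
          obtain ⟨e, he, he1⟩ := List.mem_map.mp hc
          exact Option.isSome_iff_exists.mp (List.find?_isSome.mpr ⟨e, he, by simp [he1]⟩)
      have hfb : ∃ eB, (pvEvB m T).find? (fun e => decide (MB ≤ e.1)) = some eB := by
        rcases pvFoldlMax_attained ((pvEvB m T).map (·.1)) 0 with hc | hc
        · rw [← hMB] at hc; omega
        · rw [← hMB] at hc
          obtain ⟨e, he, he1⟩ := List.mem_map.mp hc
          exact Option.isSome_iff_exists.mp (List.find?_isSome.mpr ⟨e, he, by simp [he1]⟩)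
      obtain ⟨eA, hfA⟩ := hfa
      obtain ⟨eB, hfB⟩ := hfb
      rw [hfA, hfB]
      simp only [Option.map_some, Option.getD_some]
      -- facts about the found elements
      have heAmem := List.mem_of_find?_eq_some hfA
      have heBmem := List.mem_of_find?_eq_some hfB
      have heA1 : eA.1 = MA := by
        have hle := (PySem.List.le_foldl_max ((pvEvA m T).map (·.1)) 0).2 eA.1
          (List.mem_map_of_mem heAmem)
        rw [← hMA] at hle
        have hge : MA ≤ eA.1 := by simpa using List.find?_some hfA
        omega
      have heB1 : eB.1 = MA := by
        have hle := (PySem.List.le_foldl_max ((pvEvB m T).map (·.1)) 0).2 eB.1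
          (List.mem_map_of_mem heBmem)
        rw [← hMB] at hle
        have hge : MB ≤ eB.1 := by simpa using List.find?_some hfB
        rw [hM]; omega
      have hminA := pvFind?_min (pvEvA_pairwise m T) hfA
      have hminB := pvFind?_min (pvEvB_pairwise m T) hfB
      obtain ⟨i1, j1, ⟨hi1j1, hj1n, hsum1⟩, heAeq⟩ := (pvMem_pvEvA m T eA).mp heAmem
      obtain ⟨j0, hj0n, i0, hidx0, heBeq⟩ := (pvMem_pvEvB m T eB).mp heBmem
      obtain ⟨hi0j0, hgi0, hmin0⟩ := pvIdx_facts hidx0 (le_of_lt hj0n)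
      -- the two maxima, as linear facts
      have hmax1 : max (pvG m i1) (pvG m j1) = MA := by rw [← heA1, heAeq]
      have hmax0 : max (T - pvG m j0) (pvG m j0) = MA := by rw [← heB1, heBeq]
      have hsum0 : pvG m i0 + pvG m j0 = T := by omega
      have hmax0' : max (pvG m i0) (pvG m j0) = MA := by
        rw [show pvG m i0 = T - pvG m j0 by omega]; exact hmax0
      -- (i0, j0) is a valid pair achieving the maximum: row-major minimality of (i1, j1)
      have hA0mem : (max (pvG m i0) (pvG m j0), some (i0, j0)) ∈ pvEvA m T :=
        (pvMem_pvEvA m T _).mpr ⟨i0, j0, ⟨hi0j0, hj0n, hsum0⟩, rfl⟩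
      have h1 := hminA _ hA0mem (by simp [hmax0'])
      -- a B-candidate exists at j1 achieving the maximum: j-minimality of j0
      obtain ⟨i1', hidx1, hle1, hgi1'⟩ := pvIdx_exists hi1j1 (le_of_lt hj1n)
        (show pvG m i1 = T - pvG m j1 by omega)
      have hB1mem : (max (T - pvG m j1) (pvG m j1), some (i1', j1)) ∈ pvEvB m T :=
        (pvMem_pvEvB m T _).mpr ⟨j1, hj1n, i1', hidx1, rfl⟩
      have hfst1 : max (T - pvG m j1) (pvG m j1) = MA := by
        rw [show T - pvG m j1 = pvG m i1 by omega]; exact hmax1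
      have h2 := hminB _ hB1mem (by simp only [decide_eq_true_eq, hfst1]; omega)
      have hj0j1 : j0 ≤ j1 := by
        rcases h2 with h2 | h2
        · rw [heBeq] at h2
          injection h2 with hfst hsnd
          injection hsnd with hsnd
          injection hsnd with ha hb
          omega
        · rw [heBeq] at h2
          have := h2 (i0, j0) (i1', j1) rfl rfl
          omega
      -- conclude eA.2 = eB.2
      rcases h1 with h1 | h1
      · rw [heBeq, ← h1]
      · rw [heAeq, heBeq]
        rw [heAeq] at h1
        have hlex := h1 (i1, j1) (i0, j0) rfl rfl
        exfalso
        rcases hlex with hlt | ⟨heq, hlt⟩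
        · -- i1 < i0
          by_cases hgeq : pvG m i1 = T - pvG m j0
          · exact hmin0 i1 hlt hgeq
          · -- the two pair-value sets are {MA, T - MA} with distinct first values
            have hc1 : pvG m i1 = MA ∨ pvG m j1 = MA := by
              rcases max_choice (pvG m i1) (pvG m j1) with h | h <;> rw [h] at hmax1 <;> [left; right] <;> exact hmax1
            have hb1 : pvG m i1 ≤ MA ∧ pvG m j1 ≤ MA := by
              constructor
              · rw [← hmax1]; exact le_max_left _ _
              · rw [← hmax1]; exact le_max_right _ _
            have hc0 : pvG m i0 = MA ∨ pvG m j0 = MA := by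
              rcases max_choice (pvG m i0) (pvG m j0) with h | h <;> rw [h] at hmax0' <;> [left; right] <;> exact hmax0'
            have hb0 : pvG m i0 ≤ MA ∧ pvG m j0 ≤ MA := by
              constructor
              · rw [← hmax0']; exact le_max_left _ _
              · rw [← hmax0']; exact le_max_right _ _
            have hsumii : pvG m i1 + pvG m i0 = T := by omega
            have hmaxii : max (pvG m i1) (pvG m i0) = MA := by
              rcases max_choice (pvG m i1) (pvG m i0) with h | h <;> rw [h] <;> omega
            have hAiimem : (max (pvG m i1) (pvG m i0), some (i1, i0)) ∈ pvEvA m T :=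
              (pvMem_pvEvA m T _).mpr ⟨i1, i0, ⟨hlt, by omega, hsumii⟩, rfl⟩
            have h3 := hminA _ hAiimem (by simp [hmaxii])
            rcases h3 with h3 | h3
            · rw [heAeq] at h3
              injection h3 with hf hs
              injection hs with hs
              injection hs with ha hb
              omega
            · rw [heAeq] at h3
              have := h3 (i1, j1) (i1, i0) rfl rfl
              omega
        · omega

-- ===== VERDICT (by name: the statement is the Claim_ definition above) =====
theorem select_movie_eq_bf_spec : Claim_equal_select_movie_eq_bf := by
  intro m dur _
  show select_movie_eq_bf m dur = select_movie_eq_bf_alt m dur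
  rw [pvBridgeA, pvBridgeB, pvCore m (dur - 30)]
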